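-- pv_equiv track=rewrite | github.com/jlewis200/aoc_20 | 6/solve2.py | solve
-- ===== SOURCE A (Python) =====
-- def solve(groups):
--     yes_answers = 0
--
--     for group in groups:
--         answer_sets = []
--
--         for person in group.split("\n"):
--             answer_sets.append(set(person.strip()))
--
--         if len(answer_sets) == 1:
--             yes_answers += len(answer_sets[0])
--
--         else:
--             yes_answers += len(answer_sets[0].intersection(*answer_sets[1:]))
--
--     return yes_answers
-- ===== SOURCE B (Python) =====
-- def solve(groups):
--     total = 0
--     for group in groups:
--         persons = group.split("\n")
--         freq = {}
--         for person in persons: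
--             for ch in set(person.strip()):
--                 freq[ch] = freq.get(ch, 0) + 1
--         for count in freq.values():
--             if count == len(persons):
--                 total += 1
--     return total
-- ===== Notes on version B (the rewrite author's own statement) =====
-- stated objective: alternative
-- what changed: Replaces the per-group running set-intersection (build all person sets, then intersect them) with a single tally pass: a frequency table over each person's distinct letters, adding the number of letters whose frequency equals the person count.
import Mathlib
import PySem

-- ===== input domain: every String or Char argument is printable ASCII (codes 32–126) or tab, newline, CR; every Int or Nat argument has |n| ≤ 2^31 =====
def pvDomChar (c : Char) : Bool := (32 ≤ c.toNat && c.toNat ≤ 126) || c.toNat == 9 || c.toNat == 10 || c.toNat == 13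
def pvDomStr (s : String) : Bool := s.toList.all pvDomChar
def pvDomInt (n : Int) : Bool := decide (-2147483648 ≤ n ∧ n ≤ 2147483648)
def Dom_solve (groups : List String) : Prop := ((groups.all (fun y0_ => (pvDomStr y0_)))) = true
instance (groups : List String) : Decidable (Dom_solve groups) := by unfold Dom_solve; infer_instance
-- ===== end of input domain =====

-- B replaces A's per-group running set-intersection with a tally pass: a frequency
-- table over each person's distinct letters, counting letters whose frequency equals
-- the number of persons (objective: alternative decomposition, same cost).

-- ===== PORT A =====
def solve (groups : List String) : Int :=
  groups.foldl (fun yes_answers group =>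
    let answer_sets : List (PySem.Set Char) :=
      (PySem.Chars.splitOn group.toList ['\n']).foldl
        (fun acc person => acc ++ [PySem.Set.ofList (PySem.Chars.strip person)]) []
    if answer_sets.length = 1 then
      yes_answers + PySem.Set.len (answer_sets.headD [])
    else
      yes_answers + PySem.Set.len (answer_sets.tail.foldl PySem.Set.inter (answer_sets.headD []))) 0

-- ===== PORT B =====
def solve_alt (groups : List String) : Int :=
  groups.foldl (fun total group =>
    let persons := PySem.Chars.splitOn group.toList ['\n']
    let freq : PySem.Dict Char Int :=
      persons.foldl (fun d person =>
        (PySem.Set.ofList (PySem.Chars.strip person)).foldl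
          (fun d ch => d.insert ch (d.getD ch 0 + 1)) d) PySem.Dict.empty
    freq.values.foldl (fun t c => if c == (persons.length : Int) then t + 1 else t) total) 0

-- ===== PRECONDITION & SPEC =====
def Spec_solve (groups : List String) (out : Int) : Prop := out = solve_alt groups
instance (groups : List String) (out : Int) : Decidable (Spec_solve groups out) := by unfold Spec_solve; infer_instance

-- ===== CLAIM (what is proved, stated in full; the proofs are below) =====
def Claim_equal_solve : Prop := ∀ (groups : List String), Dom_solve groups → Spec_solve groups (solve groups)

-- ===== LEMMAS AND PROOFS =====

-- building a list by appending singletons is mapping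
theorem pv_foldl_append_map {α β : Type} (f : α → β) (l : List α) (acc : List β) :
    l.foldl (fun a x => a ++ [f x]) acc = acc ++ l.map f := by
  induction l generalizing acc with
  | nil => simp
  | cons x xs ih => simp [List.foldl_cons, ih]

-- A's intersection fold is a filter of the first set
theorem pv_foldl_inter (rest : List (PySem.Set Char)) (s0 : PySem.Set Char) :
    rest.foldl PySem.Set.inter s0
      = s0.filter (fun x => rest.all (fun s => s.contains x)) := by
  induction rest generalizing s0 with
  | nil => simp
  | cons t ts ih =>
    simp only [List.foldl_cons, ih, PySem.Set.inter, List.filter_filter, List.all_cons]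
    apply List.filter_congr
    intro x _
    simp [Bool.and_comm]

-- B's counting fold adds the number of values passing the test
theorem pv_foldl_count {α : Type} (p : α → Bool) (l : List α) (t : Int) :
    l.foldl (fun t c => if p c then t + 1 else t) t = t + (l.countP p : Int) := by
  induction l generalizing t with
  | nil => simp
  | cons x xs ih =>
    by_cases h : p x <;> simp [List.foldl_cons, h, ih] <;> push_cast <;> ring

-- count in a flatten of duplicate-free lists is at most the number of lists
theorem pv_count_flatten_le (k : Char) (ss : List (List Char))
    (h : ∀ s ∈ ss, s.Nodup) : ss.flatten.count k ≤ ss.length := by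
  induction ss with
  | nil => simp
  | cons s ts ih =>
    have h1 : s.count k ≤ 1 := (List.nodup_iff_count_le_one.mp (h s (by simp))) k
    have h2 : ts.flatten.count k ≤ ts.length := ih (fun u hu => h u (by simp [hu]))
    simp only [List.flatten_cons, List.count_append, List.length_cons]
    omega

-- that count reaches the number of lists iff the element is in every list
theorem pv_count_flatten_eq_length (k : Char) (ss : List (List Char))
    (h : ∀ s ∈ ss, s.Nodup) :
    (ss.flatten.count k = ss.length) ↔ (∀ s ∈ ss, k ∈ s) := by
  induction ss with
  | nil => simp
  | cons s ts ih =>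
    have hs : s.Nodup := h s (by simp)
    have hts : ∀ u ∈ ts, u.Nodup := fun u hu => h u (by simp [hu])
    have h1 : s.count k ≤ 1 := (List.nodup_iff_count_le_one.mp hs) k
    have h2 : ts.flatten.count k ≤ ts.length := pv_count_flatten_le k ts hts
    have hmem : (s.count k = 1) ↔ k ∈ s := by
      constructor
      · intro h'; exact List.count_pos_iff.mp (by omega)
      · intro h'; exact le_antisymm h1 (List.one_le_count_iff.mpr h')
    simp only [List.flatten_cons, List.count_append, List.length_cons]
    constructor
    · intro he u hu
      have hle : ts.flatten.count k = ts.length ∧ s.count k = 1 := by omega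
      rcases List.mem_cons.mp hu with rfl | hu'
      · exact hmem.mp hle.2
      · exact ((ih hts).mp hle.1) u hu'
    · intro hall
      have e1 : s.count k = 1 := hmem.mpr (hall s (by simp))
      have e2 : ts.flatten.count k = ts.length :=
        (ih hts).mpr (fun u hu => hall u (by simp [hu]))
      omega

-- two duplicate-free lists with the same members have the same length
theorem pv_length_eq_of_nodup_iff (l1 l2 : List Char) (h1 : l1.Nodup) (h2 : l2.Nodup)
    (h : ∀ x, x ∈ l1 ↔ x ∈ l2) : l1.length = l2.length := by
  rw [← List.toFinset_card_of_nodup h1, ← List.toFinset_card_of_nodup h2]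
  congr 1
  ext x
  simp [h x]

-- the per-group value of A equals the per-group value of B
theorem pv_main (ss : List (PySem.Set Char)) (h : ∀ s ∈ ss, List.Nodup s) :
    (if ss.length = 1 then PySem.Set.len (ss.headD []) else
      PySem.Set.len (ss.tail.foldl PySem.Set.inter (ss.headD [])))
    = ((PySem.Dict.counter ss.flatten).values.countP
        (fun c => c == (ss.length : Int)) : Int) := by
  cases ss with
  | nil => decide
  | cons s0 rest =>
    have hnod0 : s0.Nodup := h s0 (by simp)
    have hL : (if (s0 :: rest).length = 1 then PySem.Set.len ((s0 :: rest).headD []) else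
        PySem.Set.len ((s0 :: rest).tail.foldl PySem.Set.inter ((s0 :: rest).headD [])))
        = PySem.Set.len (rest.foldl PySem.Set.inter s0) := by
      split_ifs with hlen
      · have hr : rest = [] := by
          have : rest.length = 0 := by simpa using hlen
          exact List.length_eq_zero_iff.mp this
        subst hr; rfl
      · rfl
    rw [hL, pv_foldl_inter]
    have hval : (PySem.Dict.counter (s0 :: rest).flatten).values
        = (PySem.Set.ofList (s0 :: rest).flatten).map
            (fun k => (((s0 :: rest).flatten.count k : Nat) : Int)) := by
      show ((PySem.Dict.counter (s0 :: rest).flatten).items.map (fun x => x.2)) = _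
      rw [PySem.Dict.items_counter]
      simp [List.map_map, Function.comp]
    rw [hval, List.countP_map]
    have hpred : ∀ k, ((fun c => c == (((s0 :: rest).length : Nat) : Int)) ∘
        (fun k => (((s0 :: rest).flatten.count k : Nat) : Int))) k
        = (s0 :: rest).all (fun s => s.contains k) := by
      intro k
      rw [Bool.eq_iff_iff]
      simp only [Function.comp_apply, beq_iff_eq, Nat.cast_inj, List.all_eq_true,
        PySem.Set.contains, List.contains_iff_mem]
      exact pv_count_flatten_eq_length k _ h
    rw [List.countP_congr (fun k _ => by rw [hpred k])]
    rw [List.countP_eq_length_filter]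
    have hflen : ((PySem.Set.ofList (s0 :: rest).flatten).filter
          (fun k => (s0 :: rest).all (fun s => s.contains k))).length
        = (s0.filter (fun x => rest.all (fun s => s.contains x))).length := by
      apply pv_length_eq_of_nodup_iff
      · exact (PySem.Set.nodup_ofList _).filter _
      · exact hnod0.filter _
      · intro x
        simp only [List.mem_filter, PySem.Set.mem_ofList, List.all_cons, Bool.and_eq_true,
          PySem.Set.contains, List.contains_iff_mem, decide_eq_true_iff]
        constructor
        · rintro ⟨_, hx0, hrest⟩
          exact ⟨hx0, hrest⟩
        · rintro ⟨hx0, hrest⟩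
          exact ⟨List.mem_flatten.mpr ⟨s0, by simp, hx0⟩, hx0, hrest⟩
    rw [hflen]
    simp [PySem.Set.len]

-- the nested per-person fold is the fold over the flattened list of person sets
theorem pv_foldl_sets (persons : List (List Char)) (d : PySem.Dict Char Int) :
    persons.foldl (fun d person =>
        (PySem.Set.ofList (PySem.Chars.strip person)).foldl
          (fun d ch => d.insert ch (d.getD ch 0 + 1)) d) d
    = ((persons.map (fun person => PySem.Set.ofList (PySem.Chars.strip person))).flatten).foldl
        (fun d ch => d.insert ch (d.getD ch 0 + 1)) d := by
  induction persons generalizing d with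
  | nil => rfl
  | cons p ps ih => simp [List.foldl_cons, List.foldl_append, ih]

-- the step functions of the two top-level folds agree
theorem pv_step_eq (acc : Int) (g : String) :
    (if ((PySem.Chars.splitOn g.toList ['\n']).foldl
          (fun a person => a ++ [PySem.Set.ofList (PySem.Chars.strip person)])
          ([] : List (PySem.Set Char))).length = 1 then
       acc + PySem.Set.len (((PySem.Chars.splitOn g.toList ['\n']).foldl
          (fun a person => a ++ [PySem.Set.ofList (PySem.Chars.strip person)])
          ([] : List (PySem.Set Char))).headD [])
     else
       acc + PySem.Set.len (((PySem.Chars.splitOn g.toList ['\n']).foldl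
          (fun a person => a ++ [PySem.Set.ofList (PySem.Chars.strip person)])
          ([] : List (PySem.Set Char))).tail.foldl PySem.Set.inter
          (((PySem.Chars.splitOn g.toList ['\n']).foldl
            (fun a person => a ++ [PySem.Set.ofList (PySem.Chars.strip person)])
            ([] : List (PySem.Set Char))).headD [])))
    = ((PySem.Chars.splitOn g.toList ['\n']).foldl
        (fun d person =>
          (PySem.Set.ofList (PySem.Chars.strip person)).foldl
            (fun d ch => d.insert ch (d.getD ch 0 + 1)) d)
        (PySem.Dict.empty : PySem.Dict Char Int)).values.foldl
        (fun t c => if c == ((PySem.Chars.splitOn g.toList ['\n']).length : Int)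
          then t + 1 else t) acc := by
  set persons := PySem.Chars.splitOn g.toList ['\n'] with hp
  have hsets : persons.foldl
      (fun a person => a ++ [PySem.Set.ofList (PySem.Chars.strip person)])
      ([] : List (PySem.Set Char))
      = persons.map (fun person => PySem.Set.ofList (PySem.Chars.strip person)) := by
    simpa using pv_foldl_append_map
      (fun person => PySem.Set.ofList (PySem.Chars.strip person)) persons []
  have hfreq : persons.foldl (fun d person =>
        (PySem.Set.ofList (PySem.Chars.strip person)).foldl
          (fun d ch => d.insert ch (d.getD ch 0 + 1)) d)
        (PySem.Dict.empty : PySem.Dict Char Int)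
      = PySem.Dict.counter
          ((persons.map (fun person => PySem.Set.ofList (PySem.Chars.strip person))).flatten) := by
    rw [pv_foldl_sets]
    exact PySem.Dict.foldl_insert_getD_add_one_eq_counter _
  rw [hsets, hfreq, pv_foldl_count]
  have hlen : persons.length
      = (persons.map (fun person => PySem.Set.ofList (PySem.Chars.strip person))).length := by simp
  rw [hlen]
  have hnod : ∀ s ∈ persons.map (fun person => PySem.Set.ofList (PySem.Chars.strip person)),
      List.Nodup s := by
    intro s hs
    rcases List.mem_map.mp hs with ⟨p, _, rfl⟩
    exact PySem.Set.nodup_ofList _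
  have hm := pv_main (persons.map (fun person => PySem.Set.ofList (PySem.Chars.strip person))) hnod
  split_ifs with hc
  · rw [if_pos hc] at hm; omega
  · rw [if_neg hc] at hm; omega

-- the two top-level folds agree from any accumulator
theorem pv_fold_eq (gs : List String) : ∀ acc : Int,
    gs.foldl (fun yes_answers group =>
      let answer_sets : List (PySem.Set Char) :=
        (PySem.Chars.splitOn group.toList ['\n']).foldl
          (fun a person => a ++ [PySem.Set.ofList (PySem.Chars.strip person)]) []
      if answer_sets.length = 1 then
        yes_answers + PySem.Set.len (answer_sets.headD [])
      else
        yes_answers + PySem.Set.len (answer_sets.tail.foldl PySem.Set.inter (answer_sets.headD []))) acc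
    = gs.foldl (fun total group =>
      let persons := PySem.Chars.splitOn group.toList ['\n']
      let freq : PySem.Dict Char Int :=
        persons.foldl (fun d person =>
          (PySem.Set.ofList (PySem.Chars.strip person)).foldl
            (fun d ch => d.insert ch (d.getD ch 0 + 1)) d) PySem.Dict.empty
      freq.values.foldl (fun t c => if c == (persons.length : Int) then t + 1 else t) total) acc := by
  induction gs with
  | nil => intro acc; rfl
  | cons g gs ih =>
    intro acc
    rw [List.foldl_cons, List.foldl_cons, ih]
    exact congrArg (fun a => List.foldl _ a gs) (pv_step_eq acc g)

-- ===== VERDICT (by name: the statement is the Claim_ definition above) =====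
theorem solve_spec : Claim_equal_solve := by
  intro groups _
  show solve groups = solve_alt groups
  exact pv_fold_eq groups 0
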